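-- pv_equiv track=rewrite | github.com/Bramikha7/DSA_Learning | 29th_jan/main.py | encrypt_sent
-- ===== SOURCE A (Python) =====
-- def encrypt_sent(sent):
--     words = "qwertyuioplkjhgfdsazxcvbnm"
--     result_sent = ""
--     for i in range(len(sent)):
--         if sent[i] in words:
--             result_sent += sent[i]
--         else:
--             if result_sent != "" and result_sent[-1] != " ":
--                 result_sent += " "
--     return result_sent
-- ===== SOURCE B (Python) =====
-- def encrypt_sent(sent):
--     # Map every non-lowercase-letter to a space, then rebuild with split/join,
--     # which collapses runs; re-attach the single trailing space A keeps.
--     mapped = ''.join(c if 'a' <= c <= 'z' else ' ' for c in sent)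
--     collapsed = ' '.join(mapped.split())
--     if collapsed and mapped.endswith(' '):
--         collapsed += ' '
--     return collapsed
-- ===== Notes on version B (the rewrite author's own statement) =====
-- stated objective: idiomatic
-- what changed: Replaces A's character-by-character state machine (append letter, else append a space when the last output char is not already a space) with the idiomatic two-phase form: map every non-letter to a space, collapse the runs with split/join, and re-attach the single trailing space the original keeps.
import Mathlib
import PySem

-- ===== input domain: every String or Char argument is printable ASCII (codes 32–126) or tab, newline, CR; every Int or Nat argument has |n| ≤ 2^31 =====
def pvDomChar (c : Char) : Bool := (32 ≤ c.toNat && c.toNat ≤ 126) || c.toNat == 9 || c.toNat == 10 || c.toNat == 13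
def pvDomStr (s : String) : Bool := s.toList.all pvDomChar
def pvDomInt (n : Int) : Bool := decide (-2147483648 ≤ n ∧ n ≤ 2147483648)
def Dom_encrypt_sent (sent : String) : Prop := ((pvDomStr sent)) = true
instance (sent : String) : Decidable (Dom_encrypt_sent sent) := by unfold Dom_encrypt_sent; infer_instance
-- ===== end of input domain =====

-- B replaces A's character-by-character keep/collapse state machine by map-to-spaces + split/join (idiomatic, same cost).

-- ===== PORT A =====
-- the constant string `words` of A, as its characters
def pyWords : List Char :=
  ['q','w','e','r','t','y','u','i','o','p','l','k','j','h','g','f','d','s','a','z','x','c','v','b','n','m']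

-- the body of A's `for` loop: append a kept letter, else append at most one space
def stepA (acc : List Char) (c : Char) : List Char :=
  if pyWords.contains c then acc ++ [c]
  else if acc ≠ [] ∧ acc.getLast? ≠ some ' ' then acc ++ [' '] else acc

def encrypt_sent (sent : String) : String :=
  String.ofList (sent.toList.foldl stepA [])

-- ===== PORT B =====
-- `c if 'a' <= c <= 'z' else ' '` from Source B's generator expression
def mapB (c : Char) : Char := if 'a' ≤ c ∧ c ≤ 'z' then c else ' '

def encrypt_sent_alt (sent : String) : String :=
  let mapped := sent.toList.map mapB
  let collapsed := PySem.Chars.join [' '] (PySem.Chars.split₀ mapped)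
  String.ofList (if collapsed ≠ [] ∧ mapped.getLast? = some ' ' then collapsed ++ [' '] else collapsed)

-- ===== PRECONDITION & SPEC =====
def Spec_encrypt_sent (sent : String) (out : String) : Prop := out = encrypt_sent_alt sent
instance (sent : String) (out : String) : Decidable (Spec_encrypt_sent sent out) := by unfold Spec_encrypt_sent; infer_instance

-- ===== CLAIM (what is proved, stated in full; the proofs are below) =====
def Claim_equal_encrypt_sent : Prop := ∀ (sent : String), Dom_encrypt_sent sent → Spec_encrypt_sent sent (encrypt_sent sent)

-- ===== LEMMAS AND PROOFS =====

-- common normal form: collapse each maximal space-run into one space, dropping a leading run (flag = "swallow spaces")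
def collapse : List Char → Bool → List Char
  | [], _ => []
  | c :: r, flag =>
    if PySem.Chars.isspace c then (if flag then collapse r true else ' ' :: collapse r true)
    else c :: collapse r false

-- the whitespace-separated words of a list, by direct recursion
def wordsOf : List Char → List (List Char)
  | [] => []
  | c :: r =>
    if PySem.Chars.isspace c then wordsOf r
    else (c :: r.takeWhile (fun d => !PySem.Chars.isspace d)) :: wordsOf (r.dropWhile (fun d => !PySem.Chars.isspace d))
termination_by l => l.length
decreasing_by
  · simp
  · have hlen := List.length_dropWhile_le (fun d => !PySem.Chars.isspace d) r
    simp only [List.length_cons]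
    omega

lemma space_isspace : PySem.Chars.isspace ' ' = true := by decide

lemma char_bounds {c : Char} (h1 : 'a' ≤ c) (h2 : c ≤ 'z') : 97 ≤ c.toNat ∧ c.toNat ≤ 122 := by
  rw [Char.le_def, UInt32.le_iff_toNat_le] at h1 h2
  exact ⟨h1, h2⟩

lemma mem_letters (c : Char) : pyWords.contains c = true ↔ ('a' ≤ c ∧ c ≤ 'z') := by
  constructor
  · intro h
    simp [pyWords, List.contains_eq_mem] at h
    rcases h with rfl|rfl|rfl|rfl|rfl|rfl|rfl|rfl|rfl|rfl|rfl|rfl|rfl|rfl|rfl|rfl|rfl|rfl|rfl|rfl|rfl|rfl|rfl|rfl|rfl|rfl <;>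
      exact ⟨by decide, by decide⟩
  · rintro ⟨h1, h2⟩
    obtain ⟨hb1, hb2⟩ := char_bounds h1 h2
    have hc : c = Char.ofNat c.toNat := (Char.ofNat_toNat c).symm
    obtain ⟨n, hn⟩ : ∃ n, c.toNat = n := ⟨_, rfl⟩
    rw [hn] at hc hb1 hb2
    interval_cases n <;> (rw [hc]; decide)

lemma letter_not_space {c : Char} (h1 : 'a' ≤ c) (h2 : c ≤ 'z') : PySem.Chars.isspace c = false := by
  obtain ⟨hb1, hb2⟩ := char_bounds h1 h2
  simp [PySem.Chars.isspace]
  omega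

lemma letter_ne_space {c : Char} (h1 : 'a' ≤ c) (h2 : c ≤ 'z') : c ≠ ' ' := by
  intro h; subst h; exact absurd h1 (by decide)

lemma map_only_ws (l : List Char) : ∀ d ∈ l.map mapB, PySem.Chars.isspace d = (d == ' ') := by
  intro d hd
  simp only [List.mem_map] at hd
  obtain ⟨c, _, rfl⟩ := hd
  by_cases h : 'a' ≤ c ∧ c ≤ 'z'
  · simp [mapB, h, letter_not_space h.1 h.2, letter_ne_space h.1 h.2]
  · simp [mapB, h, space_isspace]

-- A's fold equals collapse of the mapped string
lemma foldA_eq_collapse (l : List Char) : ∀ (acc : List Char),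
    l.foldl stepA acc = acc ++ collapse (l.map mapB) (decide (acc = [] ∨ acc.getLast? = some ' ')) := by
  induction l with
  | nil => intro acc; simp [collapse]
  | cons c r ih =>
    intro acc
    simp only [List.foldl_cons, List.map_cons]
    by_cases hc : pyWords.contains c = true
    · obtain ⟨h1, h2⟩ := (mem_letters c).mp hc
      have hmem : c ∈ pyWords := by simpa [List.contains_eq_mem] using hc
      have hm : mapB c = c := by simp [mapB, h1, h2]
      have hs : stepA acc c = acc ++ [c] := by simp [stepA, hmem]
      rw [hs, ih]
      have hflag : (decide ((acc ++ [c]) = [] ∨ (acc ++ [c]).getLast? = some ' ')) = false := by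
        simp [letter_ne_space h1 h2]
      rw [hflag, hm]
      simp [collapse, letter_not_space h1 h2]
    · have hrange : ¬('a' ≤ c ∧ c ≤ 'z') := fun h => hc ((mem_letters c).mpr h)
      have hmem : c ∉ pyWords := by simpa [List.contains_eq_mem] using hc
      have hm : mapB c = ' ' := by simp [mapB, hrange]
      by_cases hflag : (acc = [] ∨ acc.getLast? = some ' ')
      · have hni : ¬(acc ≠ [] ∧ acc.getLast? ≠ some ' ') := by tauto
        have hs : stepA acc c = acc := by simp [stepA, hmem, hni]
        rw [hs, ih, hm]
        simp [collapse, space_isspace, decide_eq_true hflag]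
      · have hne : acc ≠ [] ∧ acc.getLast? ≠ some ' ' := by tauto
        have hs : stepA acc c = acc ++ [' '] := by simp [stepA, hmem, hne.1, hne.2]
        rw [hs, ih, hm]
        have ht : (decide ((acc ++ [' ']) = [] ∨ (acc ++ [' ']).getLast? = some ' ')) = true := by simp
        have h0 : (decide (acc = [] ∨ acc.getLast? = some ' ')) = false := decide_eq_false hflag
        rw [ht, h0]
        simp [collapse, space_isspace]

-- split₀'s worker characterised by wordsOf
lemma go_eq (m : List Char) : ∀ (cur : List Char) (acc : List (List Char)),
    (∀ d ∈ cur, PySem.Chars.isspace d = false) →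
    PySem.Chars.split₀.go m cur acc =
      acc.reverse ++ (if cur = [] then wordsOf m
        else (cur.reverse ++ m.takeWhile (fun d => !PySem.Chars.isspace d)) ::
              wordsOf (m.dropWhile (fun d => !PySem.Chars.isspace d))) := by
  induction m with
  | nil =>
    intro cur acc _
    rcases cur with _ | ⟨x, xs⟩
    · simp [PySem.Chars.split₀.go, wordsOf]
    · simp [PySem.Chars.split₀.go, wordsOf]
  | cons c rest ih =>
    intro cur acc hcur
    by_cases hsp : PySem.Chars.isspace c = true
    · rcases cur with _ | ⟨x, xs⟩
      · rw [show PySem.Chars.split₀.go (c :: rest) [] acc = PySem.Chars.split₀.go rest [] acc by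
            simp [PySem.Chars.split₀.go, hsp]]
        rw [ih [] acc (by simp)]
        simp [wordsOf, hsp]
      · rw [show PySem.Chars.split₀.go (c :: rest) (x :: xs) acc
              = PySem.Chars.split₀.go rest [] ((x :: xs).reverse :: acc) by
            simp [PySem.Chars.split₀.go, hsp]]
        rw [ih [] _ (by simp)]
        simp [wordsOf, hsp]
    · rw [show PySem.Chars.split₀.go (c :: rest) cur acc = PySem.Chars.split₀.go rest (c :: cur) acc by
          simp [PySem.Chars.split₀.go, hsp]]
      rw [ih (c :: cur) acc (by
        intro d hd
        simp only [List.mem_cons] at hd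
        rcases hd with rfl | hd
        · simpa using hsp
        · exact hcur d hd)]
      rcases cur with _ | ⟨x, xs⟩
      · simp [wordsOf, hsp]
      · simp [hsp]

lemma split₀_eq_wordsOf (m : List Char) : PySem.Chars.split₀ m = wordsOf m := by
  unfold PySem.Chars.split₀
  rw [go_eq m [] [] (by simp)]
  simp

-- collapse passes an initial all-nonspace word through unchanged
lemma collapse_word : ∀ (w s : List Char), (∀ x ∈ w, PySem.Chars.isspace x = false) → w ≠ [] →
    ∀ flag, collapse (w ++ s) flag = w ++ collapse s false := by
  intro w
  induction w with
  | nil => intro s _ h; exact absurd rfl h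
  | cons a w' ih =>
    intro s hw _ flag
    have ha : PySem.Chars.isspace a = false := hw a (by simp)
    rcases w' with _ | ⟨b, w''⟩
    · simp [collapse, ha]
    · have hrec := ih s (fun x hx => hw x (List.mem_cons_of_mem _ hx)) (by simp) false
      show collapse (a :: ((b :: w'') ++ s)) flag = a :: ((b :: w'') ++ collapse s false)
      simp only [collapse, ha, Bool.false_eq_true, if_false]
      rw [hrec]

-- wordsOf is empty exactly when everything is whitespace
lemma wordsOf_eq_nil (t : List Char) (h : wordsOf t = []) : ∀ x ∈ t, PySem.Chars.isspace x = true := by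
  induction t using wordsOf.induct with
  | case1 => simp
  | case2 c r hsp ih =>
    rw [wordsOf, if_pos hsp] at h
    intro x hx
    simp only [List.mem_cons] at hx
    rcases hx with rfl | hx
    · exact hsp
    · exact ih h x hx
  | case3 c r hsp ih =>
    rw [wordsOf, if_neg hsp] at h
    exact absurd h (by simp)

-- every word of wordsOf is nonempty
lemma wordsOf_mem_ne_nil (t : List Char) : ∀ w ∈ wordsOf t, w ≠ [] := by
  induction t using wordsOf.induct with
  | case1 => simp [wordsOf]
  | case2 c r hsp ih => rw [wordsOf, if_pos hsp]; exact ih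
  | case3 c r hsp ih =>
    rw [wordsOf, if_neg hsp]
    intro w hw
    simp only [List.mem_cons] at hw
    rcases hw with rfl | hw
    · simp
    · exact ih w hw

lemma join_words_ne_nil (ws : List (List Char)) (h0 : ws ≠ []) (h1 : ∀ w ∈ ws, w ≠ []) :
    PySem.Chars.join [' '] ws ≠ [] := by
  rcases ws with _ | ⟨w, ws'⟩
  · exact absurd rfl h0
  · rcases ws' with _ | ⟨w2, ws''⟩
    · simpa [PySem.Chars.join_singleton] using h1 w (by simp)
    · rw [PySem.Chars.join_cons_cons]
      have := h1 w (by simp)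
      rcases w with _ | ⟨a, w'⟩
      · exact absurd rfl this
      · simp

-- head of a dropWhile result falsifies the predicate
lemma dropWhile_head_false {p : Char → Bool} {r : List Char} {e : Char} {d' : List Char}
    (h : r.dropWhile p = e :: d') : p e = false := by
  induction r with
  | nil => simp at h
  | cons a r' ih =>
    rw [List.dropWhile_cons] at h
    by_cases hp : p a = true
    · rw [if_pos hp] at h; exact ih h
    · rw [if_neg hp] at h
      injection h with he _
      rw [← he]
      simpa using hp

lemma getLast?_append_cons (l l' : List Char) (a : Char) :
    (l ++ a :: l').getLast? = (a :: l').getLast? := by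
  rw [List.getLast?_append]
  rcases hx : (a :: l').getLast? with _ | x
  · exact absurd (List.getLast?_eq_none_iff.mp hx) (by simp)
  · rfl

-- the join/split assembly equals collapse, for lists whose whitespace is exactly ' '
lemma jw_aux : ∀ (n : ℕ) (m : List Char), m.length ≤ n →
    (∀ d ∈ m, PySem.Chars.isspace d = (d == ' ')) →
    (if PySem.Chars.join [' '] (wordsOf m) ≠ [] ∧ m.getLast? = some ' '
     then PySem.Chars.join [' '] (wordsOf m) ++ [' '] else PySem.Chars.join [' '] (wordsOf m))
      = collapse m true := by
  intro n
  induction n with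
  | zero =>
    intro m hm _
    have : m = [] := List.length_eq_zero_iff.mp (Nat.le_zero.mp hm)
    subst this
    simp [wordsOf, collapse, PySem.Chars.join_nil]
  | succ n ih =>
    intro m hm hP
    rcases m with _ | ⟨c, r⟩
    · simp [wordsOf, collapse, PySem.Chars.join_nil]
    · have hPc := hP c (by simp)
      by_cases hcsp : c = ' '
      · subst hcsp
        have hw : wordsOf (' ' :: r) = wordsOf r := by rw [wordsOf, if_pos space_isspace]
        have hcol : collapse (' ' :: r) true = collapse r true := by simp [collapse, space_isspace]
        rcases r with _ | ⟨e, r'⟩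
        · simp [wordsOf, collapse, space_isspace, PySem.Chars.join_nil]
        · have hlast : (' ' :: e :: r').getLast? = (e :: r').getLast? := List.getLast?_cons_cons
          rw [hw, hcol, hlast]
          exact ih (e :: r') (by simp at hm ⊢; omega) (fun d hd => hP d (List.mem_cons_of_mem _ hd))
      · have hsp : PySem.Chars.isspace c = false := by
          rw [hPc]; simp [hcsp]
        have hw : wordsOf (c :: r) = (c :: r.takeWhile (fun d => !PySem.Chars.isspace d))
            :: wordsOf (r.dropWhile (fun d => !PySem.Chars.isspace d)) := by
          rw [wordsOf, if_neg (by simp [hsp])]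
        have hsplit : c :: r = (c :: r.takeWhile (fun d => !PySem.Chars.isspace d))
            ++ r.dropWhile (fun d => !PySem.Chars.isspace d) := by
          simp [List.takeWhile_append_dropWhile]
        have htw : ∀ x ∈ c :: r.takeWhile (fun d => !PySem.Chars.isspace d),
            PySem.Chars.isspace x = false := by
          intro x hx
          simp only [List.mem_cons] at hx
          rcases hx with rfl | hx
          · exact hsp
          · simpa using List.mem_takeWhile_imp hx
        have hcol : collapse (c :: r) true
            = (c :: r.takeWhile (fun d => !PySem.Chars.isspace d))
              ++ collapse (r.dropWhile (fun d => !PySem.Chars.isspace d)) false := by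
          conv_lhs => rw [hsplit]
          exact collapse_word _ _ htw (by simp) true
        have hdsub : ∀ x ∈ r.dropWhile (fun d => !PySem.Chars.isspace d), x ∈ c :: r := by
          intro x hx
          exact List.mem_cons_of_mem _ ((List.dropWhile_sublist _).subset hx)
        rcases hdE : r.dropWhile (fun d => !PySem.Chars.isspace d) with _ | ⟨e, d'⟩
        · -- the whole list is a single word
          have hm' : c :: r = c :: r.takeWhile (fun d => !PySem.Chars.isspace d) := by
            conv_lhs => rw [hsplit]
            rw [hdE]; simp
          rw [hw, hdE, hcol, hdE]
          simp only [wordsOf, PySem.Chars.join_singleton, collapse]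
          have hne : c :: r.takeWhile (fun d => !PySem.Chars.isspace d) ≠ [] := by simp
          have hlast : (c :: r).getLast?
              = some ((c :: r.takeWhile (fun d => !PySem.Chars.isspace d)).getLast hne) := by
            conv_lhs => rw [hm']
            exact List.getLast?_eq_some_getLast hne
          have hlne : (c :: r.takeWhile (fun d => !PySem.Chars.isspace d)).getLast hne ≠ ' ' := by
            have hmem := List.getLast_mem hne
            have := htw _ hmem
            intro hE
            rw [hE, space_isspace] at this
            cases this
          rw [hlast]
          simp [hlne]
        · -- a space follows the first word
          have he : e = ' ' := by
            have hfalse : (fun d => !PySem.Chars.isspace d) e = false := dropWhile_head_false hdE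
            have hesp : PySem.Chars.isspace e = true := by simpa using hfalse
            have := hP e (hdsub e (by rw [hdE]; simp))
            rw [hesp] at this
            exact (beq_iff_eq.mp this.symm)
          subst he
          have hPd' : ∀ x ∈ d', PySem.Chars.isspace x = (x == ' ') :=
            fun x hx => hP x (hdsub x (by rw [hdE]; exact List.mem_cons_of_mem _ hx))
          have hlen : d'.length ≤ n := by
            have h1 : (r.dropWhile (fun d => !PySem.Chars.isspace d)).length ≤ r.length :=
              List.length_dropWhile_le _ _
            rw [hdE] at h1
            simp at h1 hm
            omega
          have IH := ih d' hlen hPd'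
          have hwd : wordsOf (' ' :: d') = wordsOf d' := by rw [wordsOf, if_pos space_isspace]
          have hcold : collapse (' ' :: d') false = ' ' :: collapse d' true := by
            simp [collapse, space_isspace]
          have hmlast : (c :: r).getLast? = (' ' :: d').getLast? := by
            conv_lhs => rw [hsplit, hdE]
            exact getLast?_append_cons _ _ _
          rcases hwE : wordsOf d' with _ | ⟨w1, ws'⟩
          · -- everything after the word is whitespace
            have hcd' : collapse d' true = [] := by
              rw [← IH, hwE]
              simp [PySem.Chars.join_nil]
            have hallsp := wordsOf_eq_nil d' hwE
            have hlast' : (' ' :: d').getLast? = some ' ' := by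
              rcases hdd : d' with _ | ⟨y, ys⟩
              · simp
              · rw [List.getLast?_cons_cons]
                have hne : y :: ys ≠ [] := by simp
                have hmem := List.getLast_mem hne
                have hmem' : (y :: ys).getLast hne ∈ d' := by rw [hdd]; exact hmem
                have h1 := hallsp _ hmem'
                have h2 := hPd' _ hmem'
                rw [h1] at h2
                have : (y :: ys).getLast hne = ' ' := beq_iff_eq.mp h2.symm
                rw [List.getLast?_eq_some_getLast hne, this]
            rw [hw, hdE, hwd, hwE, PySem.Chars.join_singleton, hcol, hdE, hcold, hcd',
              hmlast, hlast']
            simp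
          · -- at least one more word follows
            have hcol'ne : PySem.Chars.join [' '] (wordsOf d') ≠ [] := by
              rw [hwE]
              exact join_words_ne_nil _ (by simp) (fun w hwm => wordsOf_mem_ne_nil d' w (hwE ▸ hwm))
            have hd'ne : d' ≠ [] := by
              rintro rfl
              simp [wordsOf] at hwE
            have hlast2 : (' ' :: d').getLast? = d'.getLast? := by
              rcases d' with _ | ⟨y, ys⟩
              · exact absurd rfl hd'ne
              · exact List.getLast?_cons_cons
            have hjoin : PySem.Chars.join [' '] (wordsOf (c :: r))
                = (c :: r.takeWhile (fun d => !PySem.Chars.isspace d))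
                  ++ ' ' :: PySem.Chars.join [' '] (wordsOf d') := by
              rw [hw, hdE, hwd, hwE, PySem.Chars.join_cons_cons, ← hwE]
              simp
            rw [hjoin, hcol, hdE, hcold, hmlast, hlast2]
            by_cases hl : d'.getLast? = some ' '
            · rw [if_pos ⟨by simp, hl⟩]
              have hcd' : collapse d' true = PySem.Chars.join [' '] (wordsOf d') ++ [' '] := by
                rw [← IH, if_pos ⟨hcol'ne, hl⟩]
              rw [hcd']
              simp
            · rw [if_neg (by simp [hl])]
              have hcd' : collapse d' true = PySem.Chars.join [' '] (wordsOf d') := by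
                rw [← IH, if_neg (by simp [hl])]
              rw [hcd']

lemma join_wordsOf_eq_collapse (m : List Char) (hP : ∀ d ∈ m, PySem.Chars.isspace d = (d == ' ')) :
    (if PySem.Chars.join [' '] (wordsOf m) ≠ [] ∧ m.getLast? = some ' '
     then PySem.Chars.join [' '] (wordsOf m) ++ [' '] else PySem.Chars.join [' '] (wordsOf m))
      = collapse m true :=
  jw_aux m.length m le_rfl hP

-- ===== VERDICT (by name: the statement is the Claim_ definition above) =====
theorem encrypt_sent_spec : Claim_equal_encrypt_sent := by
  intro sent _
  unfold Spec_encrypt_sent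
  have hA : encrypt_sent sent = String.ofList (collapse (sent.toList.map mapB) true) := by
    unfold encrypt_sent
    rw [foldA_eq_collapse]
    simp
  have hB0 : encrypt_sent_alt sent = String.ofList
      (if PySem.Chars.join [' '] (PySem.Chars.split₀ (sent.toList.map mapB)) ≠ []
          ∧ (sent.toList.map mapB).getLast? = some ' '
        then PySem.Chars.join [' '] (PySem.Chars.split₀ (sent.toList.map mapB)) ++ [' ']
        else PySem.Chars.join [' '] (PySem.Chars.split₀ (sent.toList.map mapB))) := rfl
  rw [hA, hB0]
  rw [split₀_eq_wordsOf]
  rw [join_wordsOf_eq_collapse _ (map_only_ws sent.toList)]
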